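-- pv_equiv track=rewrite | github.com/guysl10/CommonClassNamer | common_class_namer.py | get_words_occurrence_count
-- ===== SOURCE A (Python) =====
-- from typing import List, Dict
--
-- def get_words_occurrence_count(repeated_words: List[List[str]]
--                                ) -> Dict[str, int]:
--     """
--     Count the occurrence of each word.
--
--     :return: Dictionary of all words occurrence.
--     """
--     flat_list_of_words = [item for word in repeated_words for item in word]
--     words_occurrence_count = {}
--     for word in flat_list_of_words:
--         if word in words_occurrence_count:
--             words_occurrence_count[word] += 1
--         else:
--             words_occurrence_count[word] = 1
--
--     return words_occurrence_count
-- ===== SOURCE B (Python) =====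
-- from typing import List, Dict
--
--
-- def _tally(words: List[str]) -> Dict[str, int]:
--     """Count occurrences within a single sublist."""
--     part = {}
--     for word in words:
--         part[word] = part.get(word, 0) + 1
--     return part
--
--
-- def get_words_occurrence_count(repeated_words: List[List[str]]
--                                ) -> Dict[str, int]:
--     """Map each sublist to its own count dict, then merge the partial dicts."""
--     partials = [_tally(words) for words in repeated_words]
--     total = {}
--     for part in partials:
--         for word, count in part.items():
--             total[word] = total.get(word, 0) + count
--     return total
-- ===== Notes on version B (the rewrite author's own statement) =====
-- stated objective: alternative
-- what changed: Replaces A's flatten-then-single-tally scan with a map-reduce: each inner sublist is tallied into its own partial dict, and a second pass merges the partial dicts by adding counts.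
import Mathlib
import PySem

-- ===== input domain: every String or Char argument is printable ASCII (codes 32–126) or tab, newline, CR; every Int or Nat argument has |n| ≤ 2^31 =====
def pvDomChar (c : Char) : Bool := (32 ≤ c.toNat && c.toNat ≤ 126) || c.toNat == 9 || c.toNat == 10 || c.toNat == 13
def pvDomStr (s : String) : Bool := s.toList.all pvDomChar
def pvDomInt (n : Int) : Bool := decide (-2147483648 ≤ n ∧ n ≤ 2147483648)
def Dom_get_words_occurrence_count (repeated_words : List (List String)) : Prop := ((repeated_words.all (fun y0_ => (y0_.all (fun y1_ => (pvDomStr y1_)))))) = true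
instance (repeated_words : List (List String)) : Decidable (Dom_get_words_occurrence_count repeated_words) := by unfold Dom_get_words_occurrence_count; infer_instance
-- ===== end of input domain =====

-- B replaces A's flatten-then-single-tally scan with a map-reduce over the nested structure:
-- one partial count dict per sublist, then a merge pass adding counts (alternative decomposition, same cost).


-- ===== PORT A =====
def get_words_occurrence_count (repeated_words : List (List String)) : List (String × Int) :=
  let flat_list_of_words := repeated_words.flatMap (fun word => word)
  let words_occurrence_count :=
    flat_list_of_words.foldl
      (fun d word =>
        if d.contains word then d.modify word 0 (· + 1) else d.insert word 1)
      PySem.Dict.empty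
  words_occurrence_count.items

-- ===== PORT B =====
-- helper: per-sublist tally (B's _tally)
def pvTally (words : List String) : PySem.Dict String Int :=
  words.foldl (fun part word => part.insert word (part.getD word 0 + 1)) PySem.Dict.empty

-- helper: the inner merge loop of B ('for word, count in part.items(): …')
def pvMerge (total part : PySem.Dict String Int) : PySem.Dict String Int :=
  part.items.foldl (fun t kv => t.insert kv.1 (t.getD kv.1 0 + kv.2)) total

def get_words_occurrence_count_alt (repeated_words : List (List String)) : List (String × Int) :=
  let partials := repeated_words.map pvTally
  (partials.foldl pvMerge PySem.Dict.empty).items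

-- ===== PRECONDITION & SPEC =====
def Spec_get_words_occurrence_count (repeated_words : List (List String)) (out : List (String × Int)) : Prop := out = get_words_occurrence_count_alt repeated_words
instance (repeated_words : List (List String)) (out : List (String × Int)) : Decidable (Spec_get_words_occurrence_count repeated_words out) := by unfold Spec_get_words_occurrence_count; infer_instance

-- ===== CLAIM (what is proved, stated in full; the proofs are below) =====
def Claim_equal_get_words_occurrence_count : Prop := ∀ (repeated_words : List (List String)), Dom_get_words_occurrence_count repeated_words → Spec_get_words_occurrence_count repeated_words (get_words_occurrence_count repeated_words)

-- ===== LEMMAS AND PROOFS =====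

-- A's branchy update step is exactly Counter's modify step
theorem pvA_step (d : PySem.Dict String Int) (w : String) :
    (if d.contains w then d.modify w 0 (· + 1) else d.insert w 1) = d.modify w 0 (· + 1) := by
  by_cases h : d.contains w = true
  · simp [h]
  · simp only [Bool.not_eq_true] at h
    simp [h]
    show d.insert w 1 = d.insert w (d.getD w 0 + 1)
    rw [PySem.Dict.getD_of_not_contains d 0 h]
    norm_num

theorem pvA_dict (flat : List String) :
    flat.foldl (fun d word => if d.contains word then d.modify word 0 (· + 1) else d.insert word 1)
      PySem.Dict.empty = PySem.Dict.counter flat := by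
  rw [PySem.Dict.counter_eq_foldl]
  exact PySem.List.foldl_congr_mem flat _ _ _ (fun d w _ => pvA_step d w)

theorem pvTally_eq_counter (ws : List String) : pvTally ws = PySem.Dict.counter ws :=
  PySem.Dict.foldl_insert_getD_add_one_eq_counter ws

theorem pvMerge_getD (pairs : List (String × Int)) (t : PySem.Dict String Int) (k : String)
    (hn : (pairs.map Prod.fst).Nodup) :
    (pairs.foldl (fun t kv => t.insert kv.1 (t.getD kv.1 0 + kv.2)) t).getD k 0
      = t.getD k 0 + ((pairs.filter (fun kv => kv.1 == k)).map Prod.snd).sum := by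
  induction pairs generalizing t with
  | nil => simp
  | cons a rest ih =>
    simp only [List.map_cons, List.nodup_cons] at hn
    obtain ⟨ha, hrest⟩ := hn
    simp only [List.foldl_cons, List.filter_cons]
    rw [ih _ hrest]
    by_cases hk : a.1 = k
    · subst hk
      rw [PySem.Dict.getD_insert_self]
      have h0 : rest.filter (fun kv => kv.1 == a.1) = [] := by
        rw [List.filter_eq_nil_iff]
        intro kv hkv
        simp only [beq_iff_eq]
        intro h; exact ha (h ▸ List.mem_map_of_mem hkv)
      simp [h0]
    · rw [PySem.Dict.getD_insert]
      simp only [if_neg (Ne.symm hk)]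
      have : (a.1 == k) = false := by simp [hk]
      simp [this]

theorem pvCounter_filter_sum (sub : List String) (k : String) :
    (((PySem.Dict.counter sub).items.filter (fun kv => kv.1 == k)).map Prod.snd).sum
      = (sub.count k : Int) := by
  rw [PySem.Dict.items_counter]
  rw [List.filter_map]
  have hcomp : ((fun kv : String × Int => kv.1 == k) ∘ fun k' => (k', (sub.count k' : Int))) = (fun k' => k' == k) := rfl
  rw [hcomp, List.filter_beq]
  by_cases hm : k ∈ sub
  · have h1 : (PySem.Set.ofList sub).count k = 1 :=
      List.count_eq_one_of_mem (PySem.Set.nodup_ofList sub) (by rw [PySem.Set.mem_ofList]; exact hm)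
    simp [h1]
  · have h0 : (PySem.Set.ofList sub).count k = 0 :=
      List.count_eq_zero_of_not_mem (by rw [PySem.Set.mem_ofList]; exact hm)
    simp [h0, List.count_eq_zero_of_not_mem hm]

theorem pvB_getD (subs : List (List String)) (t : PySem.Dict String Int) (k : String) :
    ((subs.map pvTally).foldl pvMerge t).getD k 0
      = t.getD k 0 + ((subs.flatMap (fun w => w)).count k : Int) := by
  induction subs generalizing t with
  | nil => simp
  | cons sub rest ih =>
    simp only [List.map_cons, List.foldl_cons, List.flatMap_cons]
    rw [ih]
    have hnod : ((PySem.Dict.counter sub).items.map Prod.fst).Nodup :=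
      PySem.Dict.nodup_keys_counter sub
    rw [pvTally_eq_counter]
    unfold pvMerge
    rw [pvMerge_getD _ _ _ hnod, pvCounter_filter_sum]
    rw [List.count_append]
    push_cast
    ring

theorem pvUpdate_ofList (s : List String) (xs : List String) :
    PySem.Set.update s (PySem.Set.ofList xs) = PySem.Set.update s xs := by
  rw [PySem.Set.update_eq_append_filter, PySem.Set.update_eq_append_filter,
    PySem.Set.ofList_ofList]

theorem pvB_keys (subs : List (List String)) (t : PySem.Dict String Int) :
    ((subs.map pvTally).foldl pvMerge t).keys
      = PySem.Set.update t.keys (subs.flatMap (fun w => w)) := by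
  induction subs generalizing t with
  | nil => simp [PySem.Set.update_nil]
  | cons sub rest ih =>
    simp only [List.map_cons, List.foldl_cons, List.flatMap_cons]
    rw [ih]
    have hk : (pvMerge t (pvTally sub)).keys = PySem.Set.update t.keys sub := by
      rw [pvTally_eq_counter]
      unfold pvMerge
      rw [PySem.Dict.keys_foldl_insert_key]
      have : (PySem.Dict.counter sub).items.map Prod.fst = PySem.Set.ofList sub :=
        PySem.Dict.keys_counter sub
      rw [this, pvUpdate_ofList]
    rw [hk, PySem.Set.update_append]

-- ===== VERDICT (by name: the statement is the Claim_ definition above) =====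
theorem get_words_occurrence_count_spec : Claim_equal_get_words_occurrence_count := by
  intro repeated_words _
  show _ = _
  unfold get_words_occurrence_count get_words_occurrence_count_alt
  simp only [pvA_dict]
  set flat := repeated_words.flatMap (fun word => word) with hflat
  set dB := (repeated_words.map pvTally).foldl pvMerge PySem.Dict.empty with hdB
  have hkeys : dB.keys = PySem.Set.ofList flat := by
    rw [hdB, pvB_keys]
    simp [PySem.Set.update_nil_left, hflat, List.flatMap_id']
  have hnodB : dB.keys.Nodup := by rw [hkeys]; exact PySem.Set.nodup_ofList flat
  rw [PySem.Dict.items_counter, PySem.Dict.items_eq_map_keys dB hnodB 0, hkeys]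
  refine List.map_congr_left ?_
  intro k _
  rw [hdB, pvB_getD]
  simp [hflat, List.flatMap_id']
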